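-- pv_equiv track=rewrite | github.com/MrHamdulay/csc3-capstone | examples/data/Assignment_7/gsnkel001/util.py | check_lost
-- ===== SOURCE A (Python) =====
-- def check_lost (grid):
--     """return True if there are no 0 values and no adjacent values that are equal; otherwise False"""
--     for row in range (4):
--        for column in range (4):
--            if grid[row][column] == 0:
--                return False
--            if row != 3: #ensures not out of range
--                if grid[row][column]==grid[row+1][column]:
--                    return False
--            if column != 3: #ensures index not out of range
--                if grid[row][column]==grid[row][column+1]:
--                    return False
--     return True
-- ===== SOURCE B (Python) =====
-- def check_lost(grid):
--     """return True if there are no 0 values and no adjacent values that are equal; otherwise False"""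
--     def ok_from(k):
--         if k == 16:
--             return True
--         r, c = divmod(k, 4)
--         v = grid[r][c]
--         return (v != 0
--                 and (r == 3 or grid[r + 1][c] != v)
--                 and (c == 3 or grid[r][c + 1] != v)
--                 and ok_from(k + 1))
--     return ok_from(0)
-- ===== Notes on version B (the rewrite author's own statement) =====
-- stated objective: alternative
-- what changed: replaces A's nested for-loops with guard conditionals and early returns by a recursive scan over a single flat cell index (divmod) whose per-cell checks are one short-circuit boolean conjunction
import Mathlib
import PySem

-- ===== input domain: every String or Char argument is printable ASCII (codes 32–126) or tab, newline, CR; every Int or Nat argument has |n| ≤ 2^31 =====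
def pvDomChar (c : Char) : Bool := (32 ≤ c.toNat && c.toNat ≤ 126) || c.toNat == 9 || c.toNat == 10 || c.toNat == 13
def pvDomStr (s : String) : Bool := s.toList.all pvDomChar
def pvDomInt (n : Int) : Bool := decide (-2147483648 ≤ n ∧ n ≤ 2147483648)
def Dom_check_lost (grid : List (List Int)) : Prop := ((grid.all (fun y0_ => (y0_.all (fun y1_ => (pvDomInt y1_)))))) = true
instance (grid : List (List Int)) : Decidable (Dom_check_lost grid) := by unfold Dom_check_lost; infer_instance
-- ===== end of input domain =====

-- B replaces A's nested loops with early returns by a recursive scan over a flat cell index with short-circuit boolean conjunctions: a different decomposition of the same O(1) check (not faster).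


-- cell access grid[r][c]; the getD defaults are unreachable on inputs admitted by Pre_ (there every access is in range)
def pvCell (grid : List (List Int)) (r c : Int) : Int :=
  (PySem.List.pyGet? ((PySem.List.pyGet? grid r).getD []) c).getD 0

-- ===== PORT A =====
-- for row in range(4): for column in range(4): the early returns become nested `all` with the same branch order
def check_lost (grid : List (List Int)) : Bool :=
  (PySem.List.pyRange 0 4 1).all fun row =>
    (PySem.List.pyRange 0 4 1).all fun column =>
      if pvCell grid row column = 0 then false
      else if row ≠ 3 ∧ pvCell grid row column = pvCell grid (row + 1) column then false
      else if column ≠ 3 ∧ pvCell grid row column = pvCell grid row (column + 1) then false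
      else true

-- ===== PORT B =====
-- recursive helper ok_from(k): divmod(k, 4) is Nat division here since 0 ≤ k always (k counts 0,1,…,16);
-- the base guard is `16 ≤ k` instead of `k == 16` only for the termination measure — k starts at 0 and
-- increases by 1, so the two guards fire at exactly the same call
def pvOkFrom (grid : List (List Int)) (k : Nat) : Bool :=
  if _h : 16 ≤ k then true
  else
    let r : Int := (k / 4 : Nat)
    let c : Int := (k % 4 : Nat)
    let v := pvCell grid r c
    decide (v ≠ 0)
      && ((r == 3) || decide (pvCell grid (r + 1) c ≠ v))
      && ((c == 3) || decide (pvCell grid r (c + 1) ≠ v))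
      && pvOkFrom grid (k + 1)
termination_by 16 - k

def check_lost_alt (grid : List (List Int)) : Bool := pvOkFrom grid 0

-- ===== PRECONDITION & SPEC =====
-- Pre_ admits exactly the grids on which Python A returns (no IndexError): A scans the 16 cells row-major
-- and at cell k reads grid[r][c], then grid[r+1][c] (r ≠ 3), then grid[r][c+1] (c ≠ 3), returning False at
-- the first zero / adjacent equality; so A returns iff either every scan step passes with all reads in
-- range, or some step returns False with all reads up to that point in range.  Stated as a bounded
-- condition over the 16 positions (shape bounds and cell equalities only).
def pvInR (grid : List (List Int)) (r c : Nat) : Prop :=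
  r < grid.length ∧ c < (grid.getD r []).length
def pvAt (grid : List (List Int)) (r c : Nat) : Int :=
  (grid.getD r []).getD c 0
-- scan step k reads everything in range and fails no check
def pvPass (grid : List (List Int)) (k : Nat) : Prop :=
  pvInR grid (k / 4) (k % 4) ∧ pvAt grid (k / 4) (k % 4) ≠ 0 ∧
    (k / 4 ≠ 3 → pvInR grid (k / 4 + 1) (k % 4) ∧ pvAt grid (k / 4 + 1) (k % 4) ≠ pvAt grid (k / 4) (k % 4)) ∧
    (k % 4 ≠ 3 → pvInR grid (k / 4) (k % 4 + 1) ∧ pvAt grid (k / 4) (k % 4 + 1) ≠ pvAt grid (k / 4) (k % 4))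
-- scan step k returns False before any out-of-range read
def pvRet (grid : List (List Int)) (k : Nat) : Prop :=
  pvInR grid (k / 4) (k % 4) ∧
    (pvAt grid (k / 4) (k % 4) = 0 ∨
      (k / 4 ≠ 3 ∧ pvInR grid (k / 4 + 1) (k % 4) ∧ pvAt grid (k / 4 + 1) (k % 4) = pvAt grid (k / 4) (k % 4)) ∨
      ((k / 4 = 3 ∨ (pvInR grid (k / 4 + 1) (k % 4) ∧ pvAt grid (k / 4 + 1) (k % 4) ≠ pvAt grid (k / 4) (k % 4))) ∧
        k % 4 ≠ 3 ∧ pvInR grid (k / 4) (k % 4 + 1) ∧ pvAt grid (k / 4) (k % 4 + 1) = pvAt grid (k / 4) (k % 4)))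
def Pre_check_lost (grid : List (List Int)) : Prop :=
  (∀ k ∈ List.range 16, pvPass grid k) ∨
    (∃ k ∈ List.range 16, pvRet grid k ∧ ∀ j ∈ List.range k, pvPass grid j)
instance (grid : List (List Int)) : Decidable (Pre_check_lost grid) := by unfold Pre_check_lost pvPass pvRet pvInR; infer_instance
def pvWitness_check_lost : List (List Int) :=
  [[2, 4, 2, 4], [4, 2, 4, 2], [2, 4, 2, 4], [4, 2, 4, 2]]
def Spec_check_lost (grid : List (List Int)) (out : Bool) : Prop := out = check_lost_alt grid
instance (grid : List (List Int)) (out : Bool) : Decidable (Spec_check_lost grid out) := by unfold Spec_check_lost; infer_instance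

-- ===== CLAIM (what is proved, stated in full; the proofs are below) =====
def Claim_equal_check_lost : Prop := ∀ (grid : List (List Int)), Dom_check_lost grid → Pre_check_lost grid → Spec_check_lost grid (check_lost grid)

-- ===== LEMMAS AND PROOFS =====

-- ===== VERDICT (by name: the statement is the Claim_ definition above) =====
-- one-step unfoldings of B's recursion (the dite guard resolved), used to expand the 16 scan steps
theorem okFrom_base (g : List (List Int)) : pvOkFrom g 16 = true := by
  rw [pvOkFrom.eq_def]; simp

theorem okFrom_step (g : List (List Int)) (k : Nat) (h : ¬ 16 ≤ k) :
    pvOkFrom g k =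
      (decide (pvCell g ((k / 4 : Nat) : Int) ((k % 4 : Nat) : Int) ≠ 0)
        && ((((k / 4 : Nat) : Int) == 3) || decide (pvCell g (((k / 4 : Nat) : Int) + 1) ((k % 4 : Nat) : Int) ≠ pvCell g ((k / 4 : Nat) : Int) ((k % 4 : Nat) : Int)))
        && ((((k % 4 : Nat) : Int) == 3) || decide (pvCell g ((k / 4 : Nat) : Int) (((k % 4 : Nat) : Int) + 1) ≠ pvCell g ((k / 4 : Nat) : Int) ((k % 4 : Nat) : Int)))
        && pvOkFrom g (k + 1)) := by
  rw [pvOkFrom.eq_def]; simp [h]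

set_option maxHeartbeats 4000000 in
theorem check_lost_spec : Claim_equal_check_lost := by
  intro grid _ _
  unfold Spec_check_lost check_lost check_lost_alt
  simp only [show PySem.List.pyRange 0 4 1 = [0, 1, 2, 3] from by decide,
             List.all_cons, List.all_nil]
  conv_rhs => rw [okFrom_step grid 0 (by omega)]
  simp [okFrom_step, okFrom_base]
  rw [Bool.eq_iff_iff]
  simp only [Bool.and_eq_true, Bool.not_eq_true', decide_eq_false_iff_not]
  simp only [eq_comm]
  tauto
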